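-- pv_equiv track=rewrite | github.com/MrBrantCode/unitest_baseline | mut_generate/mist_train_cf/cf_1647/solution.py | find_3rd_o
-- ===== SOURCE A (Python) =====
-- def find_3rd_o(string, index=0, count=0):
--     if count == 3:
--         return index  # Return the index of the last 'o'
--     if index >= len(string):
--         return -1  # Return -1 if 'o' is not found three times
--
--     if string[index] == 'o':
--         count += 1
--
--     return find_3rd_o(string, index + 1, count)
-- ===== SOURCE B (Python) =====
-- def find_3rd_o(string, index=0, count=0):
--     n = len(string)
--     while count != 3 and index < n:
--         if string[index] == 'o':
--             count += 1
--         index += 1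
--     return index if count == 3 else -1
-- ===== Notes on version B (the rewrite author's own statement) =====
-- stated objective: idiomatic
-- what changed: Replaces the tail recursion with a single while loop carrying the (index, count) state, merging the two stopping tests into one loop condition and selecting the result after the loop.
-- outside the precondition, e.g. on find_3rd_o('abc', -4, 0): A raises IndexError, B raises IndexError
import Mathlib
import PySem

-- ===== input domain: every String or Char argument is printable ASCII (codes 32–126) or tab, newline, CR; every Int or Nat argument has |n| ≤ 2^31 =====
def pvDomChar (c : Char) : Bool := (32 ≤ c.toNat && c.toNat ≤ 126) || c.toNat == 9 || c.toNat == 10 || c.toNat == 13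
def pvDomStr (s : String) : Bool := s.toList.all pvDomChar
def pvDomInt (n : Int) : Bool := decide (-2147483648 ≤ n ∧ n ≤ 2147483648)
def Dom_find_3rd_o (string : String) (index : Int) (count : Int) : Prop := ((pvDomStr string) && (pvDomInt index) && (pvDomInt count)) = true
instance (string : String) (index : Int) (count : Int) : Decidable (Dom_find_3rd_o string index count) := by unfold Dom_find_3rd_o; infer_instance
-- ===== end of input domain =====

-- B replaces A's tail recursion with a single while loop over the same (index, count) state (idiomatic); return value proved equal on Pre_.


-- ===== PORT A =====
-- literal port of A's recursion; string[index] → PySem.Str.pyGet? (none = IndexError, excluded by Pre_)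
def find_3rd_o (string : String) (index : Int) (count : Int) : Int :=
  if count = 3 then index
  else if _h : index ≥ PySem.Str.len string then -1
  else
    match PySem.Str.pyGet? string index with
    | some c => find_3rd_o string (index + 1) (if c = 'o' then count + 1 else count)
    | none => -1  -- Python raises IndexError here (outside Pre_)
termination_by (PySem.Str.len string - index).toNat
decreasing_by omega

-- ===== PORT B =====
-- the while loop of Source B: state (index, count), condition count ≠ 3 ∧ index < n
def find_3rd_o_loop (string : String) (n : Int) (index : Int) (count : Int) : Int × Int :=
  if _h : count ≠ 3 ∧ index < n then
    match PySem.Str.pyGet? string index with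
    | some c => find_3rd_o_loop string n (index + 1) (if c = 'o' then count + 1 else count)
    | none => (index, count)  -- Python raises IndexError here (outside Pre_)
  else (index, count)
termination_by (n - index).toNat
decreasing_by omega

def find_3rd_o_alt (string : String) (index : Int) (count : Int) : Int :=
  let n := PySem.Str.len string
  let p := find_3rd_o_loop string n index count
  if p.2 = 3 then p.1 else -1

-- ===== PRECONDITION & SPEC =====
-- Pre_ excludes exactly the inputs where Python A raises: count ≠ 3 and a start index
-- below -len(string), on which the very first string[index] access is an IndexError.
def Pre_find_3rd_o (string : String) (index : Int) (count : Int) : Prop :=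
  count = 3 ∨ -(PySem.Str.len string) ≤ index
instance (string : String) (index : Int) (count : Int) : Decidable (Pre_find_3rd_o string index count) := by unfold Pre_find_3rd_o; infer_instance

def pvWitness_find_3rd_o : String × Int × Int := ("hooo", 0, 0)

def Spec_find_3rd_o (string : String) (index : Int) (count : Int) (out : Int) : Prop := out = find_3rd_o_alt string index count
instance (string : String) (index : Int) (count : Int) (out : Int) : Decidable (Spec_find_3rd_o string index count out) := by unfold Spec_find_3rd_o; infer_instance

-- ===== CLAIM (what is proved, stated in full; the proofs are below) =====
def Claim_equal_find_3rd_o : Prop := ∀ (string : String) (index : Int) (count : Int), Dom_find_3rd_o string index count → Pre_find_3rd_o string index count → Spec_find_3rd_o string index count (find_3rd_o string index count)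

-- ===== LEMMAS AND PROOFS =====

-- A's recursion equals B's loop followed by B's final selection (holds unconditionally).
theorem find_3rd_o_eq_alt (string : String) (index count : Int) :
    find_3rd_o string index count =
      (let p := find_3rd_o_loop string (PySem.Str.len string) index count
       if p.2 = 3 then p.1 else -1) := by
  rw [find_3rd_o.eq_def, find_3rd_o_loop.eq_def]
  by_cases hc : count = 3
  · rw [if_pos hc, dif_neg (by omega : ¬ (count ≠ 3 ∧ index < PySem.Str.len string))]
    simp [hc]
  · rw [if_neg hc]
    by_cases hi : index < PySem.Str.len string
    · rw [dif_neg (by omega : ¬ index ≥ PySem.Str.len string),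
        dif_pos (And.intro hc hi)]
      cases h : PySem.Str.pyGet? string index with
      | none => simp [hc]
      | some c =>
        exact find_3rd_o_eq_alt string (index + 1) (if c = 'o' then count + 1 else count)
    · rw [dif_pos (by omega : index ≥ PySem.Str.len string),
        dif_neg (fun hcon => hi hcon.2)]
      simp [hc]
termination_by (PySem.Str.len string - index).toNat
decreasing_by omega

-- ===== VERDICT (by name: the statement is the Claim_ definition above) =====
theorem find_3rd_o_spec : Claim_equal_find_3rd_o := by
  intro string index count _ _
  unfold Spec_find_3rd_o find_3rd_o_alt
  exact find_3rd_o_eq_alt string index count
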